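-- pv_equiv track=rewrite | github.com/Ceres445/PathPlanning | rrt.py | convert_maze
-- ===== SOURCE A (Python) =====
-- def convert_maze(maze_array):
--     # convert maze array to shapely polygon
--     # [[0, 0, 0, 0, 1],
--     #  [1, 1, 1, 1, 0],
--     #  [0, 0, 0, 1, 0],
--     #  [0, 1, 1, 1, 0],
--     #  [0, 0, 0, 0, 0]]
--
--     # to
--     # [(1,0), (1,1), (1,2), (1,3), (1,4), (2,4), (3,4), (4,4), (4,3), (4,2), (4,1), (4,0), (3,0), (2,0), (1,0)]
--
--     for j in range(len(maze_array)):
--         state = 0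
--         start = 0
--         end = 0
--         for i in range(len(maze_array[j])):
--             if maze_array[j][i] == 0:
--                 if state == 0:
--                     state = 1
--                     start = i
--                     end = i
--                 else:
--                     end = i
--             else:
--                 if state == 1:
--                     state = 0
--                     if start != end:
--                         yield [[start, j], [end, j]]
--         if state == 1 and start != end:
--             yield [[start, j], [end, j]]
--
--     for i in range(len(maze_array[0])):
--         state = 0
--         start = 0
--         end = 0
--         for j in range(len(maze_array)):
--             if maze_array[j][i] == 0:
--                 if state == 0:
--                     state = 1
--                     start = j
--                     end = j
--                 else:
--                     end = j
--             else:
--                 if state == 1: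
--                     state = 0
--                     if start != end:
--                         yield [[i, start], [i, end]]
--         if state == 1 and start != end:
--             yield [[i, start], [i, end]]
-- ===== SOURCE B (Python) =====
-- def _runs(seq):
--     # maximal runs of equal values: yields (value, start, end) with end exclusive
--     i = 0
--     n = len(seq)
--     while i < n:
--         k = i
--         while k < n and seq[k] == seq[i]:
--             k += 1
--         yield seq[i], i, k
--         i = k
--
--
-- def convert_maze(maze_array):
--     for j in range(len(maze_array)):
--         for v, a, b in _runs(maze_array[j]):
--             if v == 0 and b - a >= 2:
--                 yield [[a, j], [b - 1, j]]
--     for i in range(len(maze_array[0])):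
--         col = [maze_array[j][i] for j in range(len(maze_array))]
--         for v, a, b in _runs(col):
--             if v == 0 and b - a >= 2:
--                 yield [[i, a], [i, b - 1]]
-- ===== Notes on version B (the rewrite author's own statement) =====
-- stated objective: alternative
-- what changed: Replaces A's per-cell 0/1 state machine (state/start/end updated cell by cell, with a trailing flush) by a maximal-run decomposition: a two-pointer _runs helper yields (value, start, end) runs, and segments are just the zero runs of length >= 2.
import Mathlib
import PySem

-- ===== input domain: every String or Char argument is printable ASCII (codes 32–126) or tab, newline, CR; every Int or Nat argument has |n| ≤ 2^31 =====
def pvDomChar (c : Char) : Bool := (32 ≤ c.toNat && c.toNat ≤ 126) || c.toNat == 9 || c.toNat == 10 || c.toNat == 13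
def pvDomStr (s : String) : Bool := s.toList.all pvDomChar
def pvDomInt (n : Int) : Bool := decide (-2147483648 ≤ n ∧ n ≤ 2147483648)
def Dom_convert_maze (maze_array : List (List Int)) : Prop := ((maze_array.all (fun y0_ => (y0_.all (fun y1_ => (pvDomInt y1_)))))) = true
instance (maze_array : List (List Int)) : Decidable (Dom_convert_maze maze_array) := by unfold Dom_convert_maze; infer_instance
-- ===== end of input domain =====

-- B replaces A's per-cell 0/1 state machine by a maximal-run decomposition (two-pointer runs + filter);
-- objective: alternative decomposition, same asymptotic cost. Both ports return the list of A's/B's yields.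

-- ===== PORT A =====
-- loop body of A's inner state machine: state st = (state, start, end, yields), cell c at index i
def pvStep (emit : Nat → Nat → List (List Int))
    (st : Nat × Nat × Nat × List (List (List Int))) (i : Nat) (c : Int) :
    Nat × Nat × Nat × List (List (List Int)) :=
  if c = 0 then
    (if st.1 = 0 then (1, i, i, st.2.2.2) else (st.1, st.2.1, i, st.2.2.2))
  else
    (if st.1 = 1 then
       (0, st.2.1, st.2.2.1,
        if st.2.1 ≠ st.2.2.1 then st.2.2.2 ++ [emit st.2.1 st.2.2.1] else st.2.2.2)
     else st)

-- the trailing 'if state == 1 and start != end: yield'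
def pvFinish (emit : Nat → Nat → List (List Int))
    (st : Nat × Nat × Nat × List (List (List Int))) : List (List (List Int)) :=
  if st.1 = 1 ∧ st.2.1 ≠ st.2.2.1 then st.2.2.2 ++ [emit st.2.1 st.2.2.1] else st.2.2.2

-- one inner 'for … in range(len(seq))' pass of A over a sequence
def pvScanA (emit : Nat → Nat → List (List Int)) (seq : List Int) : List (List (List Int)) :=
  pvFinish emit
    ((List.range seq.length).foldl (fun st i => pvStep emit st i (seq.getD i 0)) (0, 0, 0, []))

def convert_maze (maze_array : List (List Int)) : List (List (List Int)) :=
  ((List.range maze_array.length).foldl (fun acc (j : Nat) =>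
      acc ++ pvScanA (fun s e => [[(s : Int), (j : Int)], [(e : Int), (j : Int)]])
        (maze_array.getD j [])) [])
  ++ ((List.range (maze_array.getD 0 []).length).foldl (fun acc (i : Nat) =>
      acc ++ pvScanA (fun s e => [[(i : Int), (s : Int)], [(i : Int), (e : Int)]])
        -- A reads maze_array[j][i] for j in range(len(maze_array)): the column, in order
        ((List.range maze_array.length).map (fun j => (maze_array.getD j []).getD i 0))) [])

-- ===== PORT B =====
-- Source B's _runs: maximal runs of equal values, (value, start, end-exclusive); the inner
-- 'while k < n and seq[k] == seq[i]' counts the prefix of the rest equal to the head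
def pvRuns : List Int → Nat → List (Int × Nat × Nat)
  | [], _ => []
  | x :: xs, i =>
    let n := 1 + (xs.takeWhile (fun y => y == x)).length
    (x, i, i + n) :: pvRuns (xs.drop (n - 1)) (i + n)
termination_by seq _ => seq.length
decreasing_by simp

-- Source B's 'for v, a, b in _runs(seq): if v == 0 and b - a >= 2: yield emit(a, b-1)'
def pvSegs (emit : Nat → Nat → List (List Int)) (seq : List Int) : List (List (List Int)) :=
  (pvRuns seq 0).filterMap (fun r =>
    if r.1 = 0 ∧ r.2.2 - r.2.1 ≥ 2 then some (emit r.2.1 (r.2.2 - 1)) else none)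

def convert_maze_alt (maze_array : List (List Int)) : List (List (List Int)) :=
  ((List.range maze_array.length).flatMap (fun (j : Nat) =>
      pvSegs (fun a b => [[(a : Int), (j : Int)], [(b : Int), (j : Int)]])
        (maze_array.getD j [])))
  ++ ((List.range (maze_array.getD 0 []).length).flatMap (fun (i : Nat) =>
      pvSegs (fun a b => [[(i : Int), (a : Int)], [(i : Int), (b : Int)]])
        ((List.range maze_array.length).map (fun j => (maze_array.getD j []).getD i 0))))

-- ===== PRECONDITION & SPEC =====
-- Pre_ excludes exactly the inputs where the fully consumed generator A raises IndexError:
-- an empty maze (maze_array[0]) and mazes where some row is shorter than row 0 (maze_array[j][i]).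
def Pre_convert_maze (maze_array : List (List Int)) : Prop :=
  maze_array ≠ [] ∧ ∀ row ∈ maze_array, (maze_array.getD 0 []).length ≤ row.length

instance (maze_array : List (List Int)) : Decidable (Pre_convert_maze maze_array) := by
  unfold Pre_convert_maze; infer_instance

def pvWitness_convert_maze : List (List Int) := [[0, 0, 1], [1, 0, 0]]

def Spec_convert_maze (maze_array : List (List Int)) (out : List (List (List Int))) : Prop := out = convert_maze_alt maze_array
instance (maze_array : List (List Int)) (out : List (List (List Int))) : Decidable (Spec_convert_maze maze_array out) := by unfold Spec_convert_maze; infer_instance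

-- ===== CLAIM (what is proved, stated in full; the proofs are below) =====
def Claim_equal_convert_maze : Prop := ∀ (maze_array : List (List Int)), Dom_convert_maze maze_array → Pre_convert_maze maze_array → Spec_convert_maze maze_array (convert_maze maze_array)

-- ===== LEMMAS AND PROOFS =====

-- structural version of A's inner loop
def pvScanL (emit : Nat → Nat → List (List Int)) :
    List Int → Nat → (Nat × Nat × Nat × List (List (List Int))) → (Nat × Nat × Nat × List (List (List Int)))
  | [], _, st => st
  | c :: cs, i, st => pvScanL emit cs (i + 1) (pvStep emit st i c)

-- pvSegs with an arbitrary starting offset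
def pvSegsF (emit : Nat → Nat → List (List Int)) (seq : List Int) (i : Nat) : List (List (List Int)) :=
  (pvRuns seq i).filterMap (fun r =>
    if r.1 = 0 ∧ r.2.2 - r.2.1 ≥ 2 then some (emit r.2.1 (r.2.2 - 1)) else none)

-- length of the zero prefix
def pvZl (cs : List Int) : Nat := (cs.takeWhile (fun y => y == (0 : Int))).length

lemma pvFoldl_range'_scanL (emit : Nat → Nat → List (List Int)) :
    ∀ (l : List Int) (i : Nat) (st : Nat × Nat × Nat × List (List (List Int))),
      (List.range' i l.length).foldl (fun st k => pvStep emit st k (l.getD (k - i) 0)) st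
        = pvScanL emit l i st := by
  intro l
  induction l with
  | nil => intro i st; rfl
  | cons c cs ih =>
    intro i st
    show (List.range' i (cs.length + 1)).foldl _ st = pvScanL emit cs (i + 1) (pvStep emit st i c)
    rw [List.range'_succ, List.foldl_cons]
    have h2 : (c :: cs).getD (i - i) 0 = c := by simp
    rw [h2]
    have hcg :
        (List.range' (i + 1) cs.length).foldl
            (fun st k => pvStep emit st k ((c :: cs).getD (k - i) 0)) (pvStep emit st i c)
          = (List.range' (i + 1) cs.length).foldl
            (fun st k => pvStep emit st k (cs.getD (k - (i + 1)) 0)) (pvStep emit st i c) := by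
      refine PySem.List.foldl_congr_mem _ _ _ _ ?_
      intro acc x hx
      have hx' := List.mem_range'_1.mp hx
      have hxe : x - i = (x - (i + 1)) + 1 := by omega
      simp only [hxe, List.getD_cons_succ]
    rw [hcg]
    exact ih (i + 1) _

lemma pvScanA_eq_scanL (emit : Nat → Nat → List (List Int)) (seq : List Int) :
    pvScanA emit seq = pvFinish emit (pvScanL emit seq 0 (0, 0, 0, [])) := by
  have h := pvFoldl_range'_scanL emit seq 0 (0, 0, 0, [])
  simp only [Nat.sub_zero] at h
  rw [pvScanA, List.range_eq_range', h]

lemma pvSegsF_nonzero (emit : Nat → Nat → List (List Int)) (c : Int) (cs : List Int) (i : Nat)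
    (hc : c ≠ 0) : pvSegsF emit (c :: cs) i = pvSegsF emit cs (i + 1) := by
  cases cs with
  | nil => simp [pvSegsF, pvRuns, hc]
  | cons d cs' =>
    by_cases hd : d = c
    · subst hd
      simp only [pvSegsF, pvRuns, List.takeWhile_cons, BEq.rfl, if_true]
      simp [hc]
      have : i + (1 + ((List.takeWhile (fun y => y == d) cs').length + 1))
           = i + 1 + (1 + (List.takeWhile (fun y => y == d) cs').length) := by omega
      rw [this]
    · have hdc : (d == c) = false := by simp [hd]
      simp [pvSegsF, pvRuns, hdc, hc]

lemma pvSegsF_zero_cons (emit : Nat → Nat → List (List Int)) (cs : List Int) (i : Nat) :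
    pvSegsF emit ((0 : Int) :: cs) i
      = (if i ≠ i + pvZl cs then [emit i (i + pvZl cs)] else [])
          ++ pvSegsF emit (cs.drop (pvZl cs)) (i + 1 + pvZl cs) := by
  simp only [pvSegsF, pvRuns, pvZl]
  rw [List.filterMap_cons]
  have h1 : 1 + (List.takeWhile (fun y => y == (0 : Int)) cs).length - 1
      = (List.takeWhile (fun y => y == (0 : Int)) cs).length := by omega
  have h2 : i + (1 + (List.takeWhile (fun y => y == (0 : Int)) cs).length)
      = i + 1 + (List.takeWhile (fun y => y == (0 : Int)) cs).length := by omega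
  rw [h1, h2]
  by_cases hz : (List.takeWhile (fun y => y == (0 : Int)) cs).length = 0
  · simp [hz]
  · have hc2 : ((0 : Int) = 0 ∧ i + 1 + (List.takeWhile (fun y => y == (0 : Int)) cs).length - i ≥ 2) := by
      constructor
      · rfl
      · omega
    rw [if_pos hc2]
    have h3 : i + 1 + (List.takeWhile (fun y => y == (0 : Int)) cs).length - 1
        = i + (List.takeWhile (fun y => y == (0 : Int)) cs).length := by omega
    rw [h3, if_pos (show i ≠ i + (List.takeWhile (fun y => y == (0 : Int)) cs).length by omega)]
    simp

lemma pvScan_pair (emit : Nat → Nat → List (List Int)) :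
    ∀ (n : Nat) (cs : List Int), cs.length ≤ n →
      ((∀ (i s0 e0 : Nat) acc,
          pvFinish emit (pvScanL emit cs i (0, s0, e0, acc)) = acc ++ pvSegsF emit cs i)
       ∧ (∀ (s e : Nat) acc,
          pvFinish emit (pvScanL emit cs (e + 1) (1, s, e, acc))
            = acc ++ (if s ≠ e + pvZl cs then [emit s (e + pvZl cs)] else [])
                  ++ pvSegsF emit (cs.drop (pvZl cs)) (e + 1 + pvZl cs))) := by
  intro n
  induction n with
  | zero =>
    intro cs h
    have hnil : cs = [] := by cases cs <;> simp_all
    subst hnil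
    refine ⟨?_, ?_⟩
    · intro i s0 e0 acc; simp [pvScanL, pvFinish, pvSegsF, pvRuns]
    · intro s e acc
      by_cases hse : s = e <;> simp [pvScanL, pvFinish, pvSegsF, pvRuns, pvZl, hse]
  | succ n ih =>
    intro cs h
    cases cs with
    | nil =>
      refine ⟨?_, ?_⟩
      · intro i s0 e0 acc; simp [pvScanL, pvFinish, pvSegsF, pvRuns]
      · intro s e acc
        by_cases hse : s = e <;> simp [pvScanL, pvFinish, pvSegsF, pvRuns, pvZl, hse]
    | cons c cs' =>
      have hlen : cs'.length ≤ n := by simp at h; omega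
      refine ⟨?_, ?_⟩
      · intro i s0 e0 acc
        by_cases hc : c = 0
        · subst hc
          show pvFinish emit (pvScanL emit cs' (i + 1) (pvStep emit (0, s0, e0, acc) i 0)) = _
          have hstep : pvStep emit (0, s0, e0, acc) i 0 = (1, i, i, acc) := by simp [pvStep]
          rw [hstep, (ih cs' hlen).2 i i acc, pvSegsF_zero_cons]
          simp [List.append_assoc]
        · show pvFinish emit (pvScanL emit cs' (i + 1) (pvStep emit (0, s0, e0, acc) i c)) = _
          have hstep : pvStep emit (0, s0, e0, acc) i c = (0, s0, e0, acc) := by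
            simp [pvStep, hc]
          rw [hstep, (ih cs' hlen).1 (i + 1) s0 e0 acc, ← pvSegsF_nonzero emit c cs' i hc]
      · intro s e acc
        by_cases hc : c = 0
        · subst hc
          show pvFinish emit (pvScanL emit cs' (e + 1 + 1) (pvStep emit (1, s, e, acc) (e + 1) 0)) = _
          have hstep : pvStep emit (1, s, e, acc) (e + 1) 0 = (1, s, e + 1, acc) := by
            simp [pvStep]
          rw [hstep, (ih cs' hlen).2 s (e + 1) acc]
          have hz : pvZl ((0 : Int) :: cs') = pvZl cs' + 1 := by
            simp [pvZl]
          rw [hz]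
          simp only [List.drop_succ_cons]
          have h1 : e + (pvZl cs' + 1) = e + 1 + pvZl cs' := by omega
          have h2 : e + 1 + (pvZl cs' + 1) = e + 1 + 1 + pvZl cs' := by omega
          rw [h1, h2]
        · show pvFinish emit (pvScanL emit cs' (e + 1 + 1) (pvStep emit (1, s, e, acc) (e + 1) c)) = _
          have hstep : pvStep emit (1, s, e, acc) (e + 1) c
              = (0, s, e, if s ≠ e then acc ++ [emit s e] else acc) := by
            simp [pvStep, hc]
          rw [hstep, (ih cs' hlen).1 (e + 1 + 1) s e _, ← pvSegsF_nonzero emit c cs' (e + 1) hc]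
          have hz : pvZl (c :: cs') = 0 := by
            simp [pvZl, hc]
          rw [hz]
          simp only [List.drop_zero, Nat.add_zero]
          split_ifs <;> simp

lemma pvScanA_eq_segs (emit : Nat → Nat → List (List Int)) (seq : List Int) :
    pvScanA emit seq = pvSegs emit seq := by
  rw [pvScanA_eq_scanL]
  have h := (pvScan_pair emit seq.length seq le_rfl).1 0 0 0 []
  rw [h]
  rfl

-- ===== VERDICT (by name: the statement is the Claim_ definition above) =====
theorem convert_maze_spec : Claim_equal_convert_maze := by
  intro maze_array _ _
  unfold Spec_convert_maze convert_maze convert_maze_alt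
  rw [PySem.List.foldl_append_eq_flatMap, PySem.List.foldl_append_eq_flatMap]
  simp only [pvScanA_eq_segs, List.nil_append]
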